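-- pv_equiv track=rewrite | github.com/utssaoauife/u-code2 | 03.py | solve
-- ===== SOURCE A (Python) =====
-- def solve(a):
--     count = {i: a.count(i) for i in set(a)}
--     s = sorted(count.keys())
--
--     if len(s) == 1: return len(a)
--
--     # Maximum possible length of counts is (2*(len(s)-2) + 2)
--     # Hence removal of duplicates is uncessary
--     # since it'll only be used to calculate a running max (later on)
--     # which is much less costlier than membership tests (even for sets)
--     # at each appending operation.
--     counts = []
--
--     for x, y, z in zip(s[:-2], s[1:-1], s[2:]):
--         if y - x <= 2:
--             counts.append(count[x] + count[y])
--         if z - x == 2: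
--             counts.append(count[x] + count[y] + count[z])
--
--     if s[-1] - s[-2] <= 2:
--         counts.append(count[s[-2]] + count[s[-1]])
--
--     # Max among summed counts and individual counts
--     return max(counts + list(count.values()))
-- ===== SOURCE B (Python) =====
-- def solve(a):
--     count = {}
--     for v in a:
--         count[v] = count.get(v, 0) + 1
--     return max(count[v] + count.get(v + 1, 0) + count.get(v + 2, 0) for v in count)
-- ===== Notes on version B (the rewrite author's own statement) =====
-- stated objective: faster
-- what changed: Replaces A's per-distinct-value a.count scan, sort of the distinct values and enumeration of consecutive pair/triple neighbour sums (with len==1 and last-pair special cases) by one frequency-dict pass and a single max over count[v]+count.get(v+1,0)+count.get(v+2,0) per distinct value.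
-- outside the precondition, e.g. on solve([]): A raises IndexError, B raises ValueError
import Mathlib
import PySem

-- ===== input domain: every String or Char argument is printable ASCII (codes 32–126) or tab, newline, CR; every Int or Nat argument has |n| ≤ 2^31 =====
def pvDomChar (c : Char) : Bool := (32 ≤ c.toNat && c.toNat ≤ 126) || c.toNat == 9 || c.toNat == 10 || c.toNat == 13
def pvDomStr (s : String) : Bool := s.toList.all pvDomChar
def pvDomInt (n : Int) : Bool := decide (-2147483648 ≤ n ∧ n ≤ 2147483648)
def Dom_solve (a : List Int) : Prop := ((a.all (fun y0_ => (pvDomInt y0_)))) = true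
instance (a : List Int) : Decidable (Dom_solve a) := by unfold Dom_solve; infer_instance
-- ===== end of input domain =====

-- B replaces A's sort of the distinct values plus pair/triple neighbour enumeration by one
-- frequency-dict pass and a single max over count[v]+count.get(v+1,0)+count.get(v+2,0) per distinct
-- value, removing A's per-value a.count scans (objective: faster, measured).
-- ===== PORT A =====
def solve (a : List Int) : Int :=
  let count : PySem.Dict Int Int :=
    (PySem.Set.ofList a).foldl (fun d i => d.insert i ((a.count i : Nat) : Int)) PySem.Dict.empty
  let s := PySem.List.sorted count.keys (fun x => x)
  if s.length == 1 then (a.length : Int)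
  else
    let trips := (PySem.List.slice s none (some (-2))).zip
      ((PySem.List.slice s (some 1) (some (-1))).zip (PySem.List.slice s (some 2) none))
    let counts : List Int := trips.foldl (fun acc t =>
      let x := t.1; let y := t.2.1; let z := t.2.2
      let acc := if y - x ≤ 2 then acc ++ [count.getD x 0 + count.getD y 0] else acc
      if z - x = 2 then acc ++ [count.getD x 0 + count.getD y 0 + count.getD z 0] else acc) []
    let counts := if PySem.List.pyGetD s (-1) 0 - PySem.List.pyGetD s (-2) 0 ≤ 2
      then counts ++ [count.getD (PySem.List.pyGetD s (-2) 0) 0 + count.getD (PySem.List.pyGetD s (-1) 0) 0]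
      else counts
    ((PySem.List.max? (counts ++ count.values) (fun x => x)).getD 0)

-- ===== PORT B =====
def solve_alt (a : List Int) : Int :=
  let count : PySem.Dict Int Int := a.foldl (fun d v => d.insert v (d.getD v 0 + 1)) PySem.Dict.empty
  ((PySem.List.max? (count.keys.map (fun v =>
    count.getD v 0 + count.getD (v + 1) 0 + count.getD (v + 2) 0)) (fun x => x)).getD 0)

-- ===== PRECONDITION & SPEC =====
-- Pre_ excludes only the empty list, on which Python A raises IndexError (and B raises ValueError).
def Pre_solve (a : List Int) : Prop := a ≠ []
instance (a : List Int) : Decidable (Pre_solve a) := by unfold Pre_solve; infer_instance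
def pvWitness_solve : List Int := [1]
def Spec_solve (a : List Int) (out : Int) : Prop := out = solve_alt a
instance (a : List Int) (out : Int) : Decidable (Spec_solve a out) := by unfold Spec_solve; infer_instance

-- ===== CLAIM (what is proved, stated in full; the proofs are below) =====
def Claim_equal_solve : Prop := ∀ (a : List Int), Dom_solve a → Pre_solve a → Spec_solve a (solve a)

-- ===== LEMMAS AND PROOFS =====

/-- count of `v` in `a`, as an integer. -/
def cntI (a : List Int) (v : Int) : Int := (a.count v : Int)

/-- B's window sum anchored at `v`. -/
def W (a : List Int) (v : Int) : Int := cntI a v + cntI a (v + 1) + cntI a (v + 2)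

/-- A's loop step, in appended form. -/
def stepF (a : List Int) : List Int → Int × Int × Int → List Int := fun acc t =>
  (if t.2.1 - t.1 ≤ 2 then acc ++ [cntI a t.1 + cntI a t.2.1] else acc) ++
  (if t.2.2 - t.1 = 2 then [cntI a t.1 + cntI a t.2.1 + cntI a t.2.2] else [])

/-- A's `zip(s[:-2], s[1:-1], s[2:])`, with the slices evaluated. -/
def tripsOf (s : List Int) : List (Int × Int × Int) :=
  (s.take (s.length - 2)).zip (((s.drop 1).take (s.length - 2)).zip (s.drop 2))

/-- A's finished `counts` list (loop result plus the optional last pair). -/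
def countsFin (a s : List Int) : List Int :=
  if PySem.List.pyGetD s (-1) 0 - PySem.List.pyGetD s (-2) 0 ≤ 2
  then (tripsOf s).foldl (stepF a) [] ++
    [cntI a (PySem.List.pyGetD s (-2) 0) + cntI a (PySem.List.pyGetD s (-1) 0)]
  else (tripsOf s).foldl (stepF a) []

theorem cntI_nonneg (a : List Int) (v : Int) : 0 ≤ cntI a v := Int.natCast_nonneg _

theorem cntI_eq_zero (a : List Int) (v : Int) (h : v ∉ a) : cntI a v = 0 := by
  simp [cntI, List.count_eq_zero.mpr h]

theorem cntI_fold (a : List Int) (v : Int) : ((List.count v a : Nat) : Int) = cntI a v := rfl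

theorem pair_le (a : List Int) (x y : Int) (h1 : x < y) (h2 : y ≤ x + 2) :
    cntI a x + cntI a y ≤ W a x := by
  have h3 := cntI_nonneg a (x + 1)
  have h4 := cntI_nonneg a (x + 2)
  have h : y = x + 1 ∨ y = x + 2 := by omega
  rcases h with h | h <;> subst h <;> unfold W <;> linarith

theorem maxd_eq (L1 L2 : List Int) (h1 : L1 ≠ []) (h2 : L2 ≠ [])
    (d12 : ∀ e ∈ L1, ∃ v ∈ L2, e ≤ v) (d21 : ∀ e ∈ L2, ∃ v ∈ L1, e ≤ v) :
    ((PySem.List.max? L1 (fun x => x)).getD 0) = ((PySem.List.max? L2 (fun x => x)).getD 0) := by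
  obtain ⟨m1, hm1⟩ : ∃ m, PySem.List.max? L1 (fun x => x) = some m := by
    cases e : PySem.List.max? L1 (fun x => x)
    · exact absurd ((PySem.List.max?_eq_none_iff L1 _).mp e) h1
    · exact ⟨_, rfl⟩
  obtain ⟨m2, hm2⟩ : ∃ m, PySem.List.max? L2 (fun x => x) = some m := by
    cases e : PySem.List.max? L2 (fun x => x)
    · exact absurd ((PySem.List.max?_eq_none_iff L2 _).mp e) h2
    · exact ⟨_, rfl⟩
  rw [hm1, hm2]
  simp only [Option.getD_some]
  obtain ⟨v2, hv2, hle2⟩ := d12 m1 (PySem.List.max?_mem hm1)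
  obtain ⟨v1, hv1, hle1⟩ := d21 m2 (PySem.List.max?_mem hm2)
  have h12 := PySem.List.max?_isMax hm2 v2 hv2
  have h21 := PySem.List.max?_isMax hm1 v1 hv1
  simp only at h12 h21
  omega

theorem dictA_eq_counter (a : List Int) :
    (PySem.Set.ofList a).foldl (fun d i => d.insert i ((a.count i : Nat) : Int)) PySem.Dict.empty
      = PySem.Dict.counter a := by
  apply PySem.Dict.ext
  rw [PySem.Dict.items_counter]
  rw [PySem.Dict.items_foldl_insert_fresh (k := fun i => i) (v := fun i => ((a.count i : Nat) : Int))]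
  · show PySem.Dict.empty.items ++ _ = _
    rw [show (PySem.Dict.empty : PySem.Dict Int Int).items = [] from rfl]
    simp
  · intro x hx; rfl
  · simpa using PySem.Set.nodup_ofList a

theorem port_step_eq (a : List Int) :
    (fun (acc : List Int) (t : Int × Int × Int) =>
      if t.2.2 - t.1 = 2 then
        (if t.2.1 - t.1 ≤ 2 then acc ++ [cntI a t.1 + cntI a t.2.1] else acc) ++
          [cntI a t.1 + cntI a t.2.1 + cntI a t.2.2]
      else if t.2.1 - t.1 ≤ 2 then acc ++ [cntI a t.1 + cntI a t.2.1] else acc)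
    = stepF a := by
  funext acc t
  unfold stepF
  split_ifs <;> simp

theorem sliceA (s : List Int) : PySem.List.slice s none (some (-2)) = s.take (s.length - 2) := by
  simp [PySem.List.slice]

theorem sliceB (s : List Int) :
    PySem.List.slice s (some 1) (some (-1)) = (s.drop 1).take (s.length - 2) := by
  rcases s with _ | ⟨x, t⟩
  · simp [PySem.List.slice]
  · simp only [PySem.List.slice, Int.reduceNeg, Order.lt_one_iff, PySem.List.clampIdx_neg_ofNat,
      zero_le_one, PySem.List.clampIdx_of_nonneg, Int.toNat_one, List.drop_one]
    congr 1

theorem sliceC (s : List Int) (h : 2 ≤ s.length) : PySem.List.slice s (some 2) none = s.drop 2 := by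
  simp only [PySem.List.slice, Nat.ofNat_nonneg, PySem.List.clampIdx_of_nonneg, Int.reduceToNat]
  rw [min_eq_left h]
  exact List.take_of_length_le (by simp)

theorem pyGetD_last (s : List Int) (h : 0 < s.length) (hh : s.length - 1 < s.length) :
    PySem.List.pyGetD s (-1) 0 = s[s.length - 1] := by
  simp only [PySem.List.pyGetD, PySem.List.pyGet?, PySem.List.pyIdx?, Int.reduceNeg]
  rw [if_neg (by omega), if_pos (by omega)]
  simp [List.getElem?_eq_getElem hh]

theorem pyGetD_last2 (s : List Int) (h : 2 ≤ s.length) (hh : s.length - 2 < s.length) :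
    PySem.List.pyGetD s (-2) 0 = s[s.length - 2] := by
  simp only [PySem.List.pyGetD, PySem.List.pyGet?, PySem.List.pyIdx?, Int.reduceNeg]
  rw [if_neg (by omega), if_pos (by omega)]
  simp [List.getElem?_eq_getElem hh]

theorem mem_foldCounts (a : List Int) (trips : List (Int × Int × Int)) (acc : List Int) (e : Int) :
    e ∈ trips.foldl (stepF a) acc ↔
    e ∈ acc ∨ ∃ t ∈ trips,
      (t.2.1 - t.1 ≤ 2 ∧ e = cntI a t.1 + cntI a t.2.1) ∨
      (t.2.2 - t.1 = 2 ∧ e = cntI a t.1 + cntI a t.2.1 + cntI a t.2.2) := by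
  induction trips generalizing acc with
  | nil => simp
  | cons t ts ih =>
    simp only [List.foldl_cons, ih, List.mem_cons, stepF]
    constructor
    · rintro (h | h)
      · rcases List.mem_append.mp h with h | h
        · split_ifs at h with h1
          · rcases List.mem_append.mp h with h | h
            · exact Or.inl h
            · exact Or.inr ⟨t, Or.inl rfl, Or.inl ⟨h1, by simpa using h⟩⟩
          · exact Or.inl h
        · split_ifs at h with h2
          · exact Or.inr ⟨t, Or.inl rfl, Or.inr ⟨h2, by simpa using h⟩⟩
          · simp at h
      · obtain ⟨t', ht', hc⟩ := h
        exact Or.inr ⟨t', Or.inr ht', hc⟩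
    · rintro (h | ⟨t', ht' | ht', hc⟩)
      · exact Or.inl (by simp [List.mem_append]; left; split_ifs <;> simp [h])
      · subst ht'
        refine Or.inl ?_
        rcases hc with ⟨h1, he⟩ | ⟨h2, he⟩
        · simp [List.mem_append, h1, he]
        · simp [List.mem_append, h2, he]
      · exact Or.inr ⟨t', ht', hc⟩

theorem mem_trips (s : List Int) (t : Int × Int × Int) (h2 : 2 ≤ s.length) :
    t ∈ tripsOf s ↔ ∃ i, ∃ h : i + 2 < s.length, t = (s[i], s[i + 1], s[i + 2]) := by
  rw [tripsOf, List.mem_iff_getElem]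
  constructor
  · rintro ⟨i, hi, he⟩
    have hi2 : i < s.length - 2 := by
      have := hi; simp [List.length_zip] at this; omega
    refine ⟨i, by omega, ?_⟩
    rw [← he]
    rw [List.getElem_zip, List.getElem_zip, List.getElem_take, List.getElem_take, List.getElem_drop,
      List.getElem_drop]
    simp [show 1 + i = i + 1 from Nat.add_comm 1 i, show 2 + i = i + 2 from Nat.add_comm 2 i]
  · rintro ⟨i, hi, he⟩
    refine ⟨i, by simp [List.length_zip]; omega, ?_⟩
    rw [List.getElem_zip, List.getElem_zip, List.getElem_take, List.getElem_take, List.getElem_drop,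
      List.getElem_drop, he]
    simp [show 1 + i = i + 1 from Nat.add_comm 1 i, show 2 + i = i + 2 from Nat.add_comm 2 i]

theorem domA (a s : List Int) (hmem : ∀ v, v ∈ s ↔ v ∈ a) (hs : s.Pairwise (· < ·))
    (hn : 2 ≤ s.length) (e : Int) (he : e ∈ countsFin a s) : ∃ v, v ∈ a ∧ e ≤ W a v := by
  have hlt := List.pairwise_iff_getElem.mp hs
  have hn1 : s.length - 1 < s.length := by omega
  have hn2 : s.length - 2 < s.length := by omega
  unfold countsFin at he
  rw [pyGetD_last s (by omega) hn1, pyGetD_last2 s hn hn2] at he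
  have loopCase : e ∈ (tripsOf s).foldl (stepF a) [] → ∃ v, v ∈ a ∧ e ≤ W a v := by
    intro h
    rw [mem_foldCounts] at h
    rcases h with h | ⟨t, ht, hc⟩
    · simp at h
    · obtain ⟨i, hi, rfl⟩ := (mem_trips s t hn).mp ht
      have hxy : s[i] < s[i + 1] := hlt i (i + 1) (by omega) (by omega) (by omega)
      have hyz : s[i + 1] < s[i + 2] := hlt (i + 1) (i + 2) (by omega) (by omega) (by omega)
      rcases hc with ⟨h1, he'⟩ | ⟨h2, he'⟩
      · exact ⟨s[i], (hmem _).mp (List.getElem_mem _),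
          he' ▸ pair_le a _ _ hxy (by simp at h1 ⊢; omega)⟩
      · refine ⟨s[i], (hmem _).mp (List.getElem_mem _), ?_⟩
        simp only at h2 he'
        have hy : s[i + 1] = s[i] + 1 := by omega
        have hz : s[i + 2] = s[i] + 2 := by omega
        rw [he', hy, hz]
        unfold W; omega
  split_ifs at he with hlast
  · rcases List.mem_append.mp he with h | h
    · exact loopCase h
    · simp only [List.mem_singleton] at h
      have hxy : s[s.length - 2] < s[s.length - 1] := hlt _ _ hn2 hn1 (by omega)
      exact ⟨s[s.length - 2], (hmem _).mp (List.getElem_mem _),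
        h ▸ pair_le a _ _ hxy (by omega)⟩
  · exact loopCase he

theorem mem_countsFin_of_loop (a s : List Int) (e : Int)
    (h : e ∈ (tripsOf s).foldl (stepF a) []) : e ∈ countsFin a s := by
  unfold countsFin; split_ifs <;> simp [h]

theorem getIdx_congr (s : List Int) (i j : Nat) (h : i = j) (hi : i < s.length)
    (hj : j < s.length) : s[i] = s[j] := by subst h; rfl

theorem domB (a s : List Int) (hmem : ∀ v, v ∈ s ↔ v ∈ a) (hs : s.Pairwise (· < ·))
    (hn : 2 ≤ s.length) (v : Int) (hv : v ∈ a) :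
    ∃ e, e ∈ countsFin a s ++ (PySem.Set.ofList a).map (cntI a) ∧ W a v ≤ e := by
  have hlt := List.pairwise_iff_getElem.mp hs
  have hmono : ∀ i j (hi : i < s.length) (hj : j < s.length), i ≤ j → s[i] ≤ s[j] := by
    intro i j hi hj hij
    rcases Nat.lt_or_ge i j with h | h
    · exact le_of_lt (hlt i j hi hj h)
    · have : i = j := by omega
      subst this; exact le_refl _
  obtain ⟨i, hi, hsi⟩ := List.mem_iff_getElem.mp ((hmem v).mpr hv)
  have hn1 : s.length - 1 < s.length := by omega
  have hn2 : s.length - 2 < s.length := by omega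
  by_cases h1 : (v + 1) ∈ s
  · -- v+1 ∈ s: it sits at index i+1
    obtain ⟨j, hj, hsj⟩ := List.mem_iff_getElem.mp h1
    have hij : i < j := by
      by_contra hc
      have := hmono j i hj hi (by omega)
      omega
    have hi1 : i + 1 < s.length := by omega
    have hsi1 : s[i + 1] = v + 1 := by
      have hup := hmono (i + 1) j hi1 hj (by omega)
      have hlo := hlt i (i + 1) hi hi1 (by omega)
      omega
    by_cases h2 : (v + 2) ∈ s
    · -- full triple at i, i+1, i+2
      obtain ⟨k, hk, hsk⟩ := List.mem_iff_getElem.mp h2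
      have hik : i + 1 < k := by
        by_contra hc
        have := hmono k (i + 1) hk hi1 (by omega)
        omega
      have hi2 : i + 2 < s.length := by omega
      have hsi2 : s[i + 2] = v + 2 := by
        have hup := hmono (i + 2) k hi2 hk (by omega)
        have hlo := hlt (i + 1) (i + 2) hi1 hi2 (by omega)
        omega
      refine ⟨W a v, List.mem_append.mpr (Or.inl (mem_countsFin_of_loop a s _ ?_)), le_refl _⟩
      rw [mem_foldCounts]
      refine Or.inr ⟨(s[i], s[i + 1], s[i + 2]), (mem_trips s _ hn).mpr ⟨i, hi2, rfl⟩,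
        Or.inr ⟨by simp; omega, ?_⟩⟩
      rw [hsi, hsi1, hsi2]; rfl
    · -- v+1 present, v+2 absent
      have hz : cntI a (v + 2) = 0 := cntI_eq_zero a _ (fun h => h2 ((hmem _).mpr h))
      have hWv : W a v = cntI a v + cntI a (v + 1) := by unfold W; omega
      by_cases hcase : i + 2 < s.length
      · refine ⟨cntI a v + cntI a (v + 1),
          List.mem_append.mpr (Or.inl (mem_countsFin_of_loop a s _ ?_)), by omega⟩
        rw [mem_foldCounts]
        refine Or.inr ⟨(s[i], s[i + 1], s[i + 2]), (mem_trips s _ hn).mpr ⟨i, hcase, rfl⟩,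
          Or.inl ⟨by simp; omega, by rw [hsi, hsi1]⟩⟩
      · -- the pair (v, v+1) is A's final pair
        have hieq : i = s.length - 2 := by omega
        refine ⟨cntI a v + cntI a (v + 1), List.mem_append.mpr (Or.inl ?_), by omega⟩
        unfold countsFin
        rw [pyGetD_last s (by omega) hn1, pyGetD_last2 s hn hn2]
        have e2 : s[s.length - 2] = v := (getIdx_congr s _ i (by omega) hn2 hi).trans hsi
        have e1 : s[s.length - 1] = v + 1 :=
          (getIdx_congr s _ (i + 1) (by omega) hn1 hi1).trans hsi1
        rw [if_pos (by rw [e1, e2]; omega)]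
        refine List.mem_append.mpr (Or.inr ?_)
        rw [e1, e2]
        simp
  · by_cases h2 : (v + 2) ∈ s
    · -- v+2 present at index i+1, v+1 absent
      have hy : cntI a (v + 1) = 0 := cntI_eq_zero a _ (fun h => h1 ((hmem _).mpr h))
      have hWv : W a v = cntI a v + cntI a (v + 2) := by unfold W; omega
      obtain ⟨k, hk, hsk⟩ := List.mem_iff_getElem.mp h2
      have hik : i < k := by
        by_contra hc
        have := hmono k i hk hi (by omega)
        omega
      have hi1 : i + 1 < s.length := by omega
      have hsi1 : s[i + 1] = v + 2 := by
        have hup := hmono (i + 1) k hi1 hk (by omega)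
        have hlo := hlt i (i + 1) hi hi1 (by omega)
        have hne : s[i + 1] ≠ v + 1 := by
          intro hx
          exact h1 (hx ▸ List.getElem_mem _)
        omega
      by_cases hcase : i + 2 < s.length
      · refine ⟨cntI a v + cntI a (v + 2),
          List.mem_append.mpr (Or.inl (mem_countsFin_of_loop a s _ ?_)), by omega⟩
        rw [mem_foldCounts]
        refine Or.inr ⟨(s[i], s[i + 1], s[i + 2]), (mem_trips s _ hn).mpr ⟨i, hcase, rfl⟩,
          Or.inl ⟨by simp; omega, by rw [hsi, hsi1]⟩⟩
      · have hieq : i = s.length - 2 := by omega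
        refine ⟨cntI a v + cntI a (v + 2), List.mem_append.mpr (Or.inl ?_), by omega⟩
        unfold countsFin
        rw [pyGetD_last s (by omega) hn1, pyGetD_last2 s hn hn2]
        have e2 : s[s.length - 2] = v := (getIdx_congr s _ i (by omega) hn2 hi).trans hsi
        have e1 : s[s.length - 1] = v + 2 :=
          (getIdx_congr s _ (i + 1) (by omega) hn1 hi1).trans hsi1
        rw [if_pos (by rw [e1, e2]; omega)]
        refine List.mem_append.mpr (Or.inr ?_)
        rw [e1, e2]
        simp
    · -- neither neighbour present: W v = cntI v, an individual count
      have hy : cntI a (v + 1) = 0 := cntI_eq_zero a _ (fun h => h1 ((hmem _).mpr h))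
      have hz : cntI a (v + 2) = 0 := cntI_eq_zero a _ (fun h => h2 ((hmem _).mpr h))
      refine ⟨cntI a v, List.mem_append.mpr (Or.inr ?_), by unfold W; omega⟩
      exact List.mem_map.mpr ⟨v, (PySem.Set.mem_ofList a v).mpr hv, rfl⟩

-- ===== VERDICT (by name: the statement is the Claim_ definition above) =====
theorem solve_spec : Claim_equal_solve := by
  intro a _hdom hpre
  unfold Spec_solve solve solve_alt
  simp only [PySem.Dict.foldl_insert_getD_add_one_eq_counter, dictA_eq_counter,
    PySem.Dict.keys_counter, PySem.Dict.getD_counter]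
  set s := PySem.List.sorted (PySem.Set.ofList a) (fun x => x) with hsdef
  have ha : a ≠ [] := hpre
  have hKne : PySem.Set.ofList a ≠ [] := by
    rcases a with _ | ⟨x, t⟩
    · exact absurd rfl ha
    · exact List.ne_nil_of_mem ((PySem.Set.mem_ofList _ x).mpr (List.mem_cons_self))
  have hperm : s.Perm (PySem.Set.ofList a) := PySem.List.sorted_perm _ _ _
  have hmem : ∀ v, v ∈ s ↔ v ∈ a := by
    intro v
    rw [hsdef, PySem.List.mem_sorted, PySem.Set.mem_ofList]
  have hpw : s.Pairwise (· < ·) := PySem.List.sorted_ofList_pairwise_lt a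
  have hlen1 : 1 ≤ s.length := by
    rw [hperm.length_eq]
    exact List.length_pos_iff.mpr hKne
  by_cases hone : s.length = 1
  · simp only [hone, beq_self_eq_true, if_true]
    obtain ⟨v, hsv⟩ := List.length_eq_one_iff.mp hone
    have hK : PySem.Set.ofList a = [v] := by
      rw [hsv] at hperm
      exact hperm.symm.eq_singleton
    rw [hK]
    simp only [List.map_cons, List.map_nil, PySem.List.max?_id_cons, List.foldl_nil,
      Option.getD_some]
    have hall : ∀ b ∈ a, v = b := by
      intro b hb
      have : b ∈ PySem.Set.ofList a := (PySem.Set.mem_ofList a b).mpr hb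
      rw [hK] at this
      have := List.mem_singleton.mp this
      omega
    have hc0 : List.count v a = a.length := List.count_eq_length.mpr hall
    have hc1 : List.count (v + 1) a = 0 := List.count_eq_zero.mpr (by
      intro h; have := hall _ h; omega)
    have hc2 : List.count (v + 2) a = 0 := List.count_eq_zero.mpr (by
      intro h; have := hall _ h; omega)
    rw [hc0, hc1, hc2]
    simp
  · simp only [beq_iff_eq, hone, if_false]
    have hn : 2 ≤ s.length := by omega
    simp only [cntI_fold]
    rw [port_step_eq a, sliceA, sliceB, sliceC s hn]
    rw [PySem.Dict.values_eq_map_keys (PySem.Dict.counter a) (PySem.Dict.nodup_keys_counter a) 0]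
    simp only [PySem.Dict.keys_counter, PySem.Dict.getD_counter, cntI_fold]
    apply maxd_eq
    · intro hnil
      rw [List.append_eq_nil_iff, List.map_eq_nil_iff] at hnil
      exact hKne hnil.2
    · intro hnil
      rw [List.map_eq_nil_iff] at hnil
      exact hKne hnil
    · intro e he
      rcases List.mem_append.mp he with h | h
      · obtain ⟨v, hva, hle⟩ := domA a s hmem hpw hn e h
        exact ⟨W a v, List.mem_map.mpr ⟨v, (PySem.Set.mem_ofList a v).mpr hva, rfl⟩, hle⟩
      · obtain ⟨v, hvK, rfl⟩ := List.mem_map.mp h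
        refine ⟨W a v, List.mem_map.mpr ⟨v, hvK, rfl⟩, ?_⟩
        have h1 := cntI_nonneg a (v + 1)
        have h2 := cntI_nonneg a (v + 2)
        unfold W
        linarith
    · intro e he
      obtain ⟨v, hvK, rfl⟩ := List.mem_map.mp he
      obtain ⟨e', he', hle⟩ := domB a s hmem hpw hn v ((PySem.Set.mem_ofList a v).mp hvK)
      exact ⟨e', he', hle⟩
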